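-- pv_equiv track=rewrite | github.com/NexventuresLtd/nexventure_PPI_propsor_NLP | create_Data_Set_ner.py | label_tokens
-- ===== SOURCE A (Python) =====
-- def label_tokens(tokens, qty, brand, model, item):
--     labels = ["O"] * len(tokens)
--
--     def find_sublist(sublist):
--         # Finds start index of sublist in tokens or returns -1
--         for i in range(len(tokens) - len(sublist) + 1):
--             if tokens[i:i+len(sublist)] == sublist:
--                 return i
--         return -1
--
--     # Label quantity (always numeric)
--     qty_str = str(qty)
--     qty_tokens = [qty_str]
--     idx = find_sublist(qty_tokens)
--     if idx != -1:
--         labels[idx] = "B-QUANTITY"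
--
--     # Label brand (can be multiple tokens)
--     if brand:
--         brand_tokens = brand.split()
--         idx = find_sublist(brand_tokens)
--         if idx != -1:
--             labels[idx] = "B-BRAND"
--             for j in range(1, len(brand_tokens)):
--                 if idx + j < len(labels):
--                     labels[idx + j] = "I-BRAND"
--
--     # Label model (can be multiple tokens)
--     if model:
--         model_tokens = model.split()
--         idx = find_sublist(model_tokens)
--         if idx != -1:
--             labels[idx] = "B-MODEL"
--             for j in range(1, len(model_tokens)):
--                 if idx + j < len(labels):
--                     labels[idx + j] = "I-MODEL"
--
--     # Label item/type (can be multiple tokens)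
--     if item:
--         item_tokens = item.split()
--         idx = find_sublist(item_tokens)
--         if idx != -1:
--             labels[idx] = "B-TYPE"
--             for j in range(1, len(item_tokens)):
--                 if idx + j < len(labels):
--                     labels[idx + j] = "I-TYPE"
--
--     return labels
-- ===== SOURCE B (Python) =====
-- def label_tokens(tokens, qty, brand, model, item):
--     n = len(tokens)
--
--     def find(pat):
--         # First start index of pat as a contiguous run in tokens, or -1.
--         # One pass over tokens; only anchor positions (first word equal)
--         # are verified against the rest of the pattern.
--         if not pat:
--             return 0
--         head, rest = pat[0], pat[1:]
--         for i, tok in enumerate(tokens):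
--             if tok == head and tokens[i + 1:i + len(pat)] == rest:
--                 return i
--         return -1
--
--     spans = []
--
--     def add(words, btag, itag):
--         s = find(words)
--         if s != -1:
--             spans.append((s, s + len(words), btag, itag))
--
--     add([str(qty)], "B-QUANTITY", "I-QUANTITY")
--     if brand:
--         add(brand.split(), "B-BRAND", "I-BRAND")
--     if model:
--         add(model.split(), "B-MODEL", "I-MODEL")
--     if item:
--         add(item.split(), "B-TYPE", "I-TYPE")
--
--     rev = list(reversed(spans))
--
--     def label_at(k):
--         # later fields overwrite earlier ones, so scan spans newest-first
--         for s, e, btag, itag in rev: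
--             if k == s:
--                 return btag
--             if s < k < e:
--                 return itag
--         return "O"
--
--     return [label_at(k) for k in range(n)]
-- ===== Notes on version B (the rewrite author's own statement) =====
-- stated objective: alternative
-- what changed: B is immutable and span-based: each field is located by one enumerate pass that verifies only anchor positions where the first word matches (no per-index list slicing of the full window), spans are collected once, and the label list is built functionally by looking up the last covering span per position, instead of A's range-and-slice rescans with in-place overwrites of a label array. Pre_ excludes only inputs where A raises IndexError (empty tokens with a whitespace-only non-empty field); B returns [] there.
import Mathlib
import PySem

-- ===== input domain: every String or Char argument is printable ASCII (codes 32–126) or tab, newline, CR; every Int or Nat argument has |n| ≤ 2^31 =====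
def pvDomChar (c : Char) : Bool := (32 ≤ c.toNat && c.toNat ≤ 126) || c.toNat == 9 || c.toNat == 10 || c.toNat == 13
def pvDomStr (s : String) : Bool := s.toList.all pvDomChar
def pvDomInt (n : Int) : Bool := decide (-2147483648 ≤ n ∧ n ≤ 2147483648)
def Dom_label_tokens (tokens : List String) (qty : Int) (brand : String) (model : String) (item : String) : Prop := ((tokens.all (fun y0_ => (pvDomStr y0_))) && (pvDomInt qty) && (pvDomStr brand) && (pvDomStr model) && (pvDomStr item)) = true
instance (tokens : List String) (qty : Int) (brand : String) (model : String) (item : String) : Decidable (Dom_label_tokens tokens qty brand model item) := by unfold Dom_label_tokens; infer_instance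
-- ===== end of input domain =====

-- B is an immutable, span-based reformulation of A (same return value on Pre_): spans are found by a
-- single enumerate pass verifying only anchor positions, and labels are built functionally per position.
-- Equivalence is about the return value only (A mutates only its local list).

-- ===== PORT A =====
-- for i in range(len(tokens)-len(sublist)+1): if tokens[i:i+len(sublist)] == sublist: return i / return -1
def pvFindLoopA (tokens sub : List String) : List Int → Int
  | [] => -1
  | i :: rest =>
      if PySem.List.slice tokens (some i) (some (i + (sub.length : Int))) == sub then i
      else pvFindLoopA tokens sub rest

def pvFindA (tokens sub : List String) : Int :=
  pvFindLoopA tokens sub (PySem.List.pyRange 0 ((tokens.length : Int) - (sub.length : Int) + 1) 1)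

-- the brand/model/item block of A: labels[idx]="B-…" then guarded I-writes
def pvApplyField (tokens labels ftoks : List String) (btag itag : String) : List String :=
  let idx := pvFindA tokens ftoks
  if idx != -1 then
    let labels1 := PySem.List.pySetD labels idx btag
    (PySem.List.pyRange 1 (ftoks.length : Int) 1).foldl
      (fun ls j => if idx + j < (ls.length : Int) then PySem.List.pySetD ls (idx + j) itag else ls) labels1
  else labels

def label_tokens (tokens : List String) (qty : Int) (brand : String) (model : String) (item : String) : List String :=
  let labels0 := List.replicate tokens.length "O"
  let qty_tokens := [PySem.Int.toStr qty]
  let idx := pvFindA tokens qty_tokens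
  let labels1 := if idx != -1 then PySem.List.pySetD labels0 idx "B-QUANTITY" else labels0
  let labels2 := if brand ≠ "" then pvApplyField tokens labels1 (PySem.Str.split₀ brand) "B-BRAND" "I-BRAND" else labels1
  let labels3 := if model ≠ "" then pvApplyField tokens labels2 (PySem.Str.split₀ model) "B-MODEL" "I-MODEL" else labels2
  let labels4 := if item ≠ "" then pvApplyField tokens labels3 (PySem.Str.split₀ item) "B-TYPE" "I-TYPE" else labels3
  labels4

-- ===== PORT B =====
-- for i, tok in enumerate(tokens): if tok == head and tokens[i+1:i+len(pat)] == rest: return i / return -1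
def pvFindBGo (tokens : List String) (head : String) (rest : List String) : List (Int × String) → Int
  | [] => -1
  | (i, tok) :: more =>
      if tok == head && PySem.List.slice tokens (some (i + 1)) (some (i + 1 + (rest.length : Int))) == rest then i
      else pvFindBGo tokens head rest more

def pvFindB (tokens pat : List String) : Int :=
  match pat with
  | [] => 0
  | head :: rest => pvFindBGo tokens head rest (PySem.List.enumerate tokens 0)

-- add(words, btag, itag)
def pvAddSpan (tokens : List String) (spans : List (Int × Int × String × String)) (words : List String)
    (btag itag : String) : List (Int × Int × String × String) :=
  let s := pvFindB tokens words
  if s != -1 then spans ++ [(s, s + (words.length : Int), btag, itag)] else spans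

-- label_at(k): scan spans newest-first
def pvLabelAt (rev : List (Int × Int × String × String)) (k : Int) : String :=
  match rev with
  | [] => "O"
  | (s, e, btag, itag) :: rest =>
      if k == s then btag else if s < k && k < e then itag else pvLabelAt rest k

def label_tokens_alt (tokens : List String) (qty : Int) (brand : String) (model : String) (item : String) : List String :=
  let spans0 : List (Int × Int × String × String) := []
  let spans1 := pvAddSpan tokens spans0 [PySem.Int.toStr qty] "B-QUANTITY" "I-QUANTITY"
  let spans2 := if brand ≠ "" then pvAddSpan tokens spans1 (PySem.Str.split₀ brand) "B-BRAND" "I-BRAND" else spans1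
  let spans3 := if model ≠ "" then pvAddSpan tokens spans2 (PySem.Str.split₀ model) "B-MODEL" "I-MODEL" else spans2
  let spans4 := if item ≠ "" then pvAddSpan tokens spans3 (PySem.Str.split₀ item) "B-TYPE" "I-TYPE" else spans3
  let rev := spans4.reverse
  (PySem.List.pyRange 0 ((tokens.length : Int)) 1).map (fun k => pvLabelAt rev k)

-- ===== PRECONDITION & SPEC =====
-- Pre_ excludes only the inputs on which A raises IndexError: empty tokens together with a
-- non-empty but whitespace-only brand/model/item (its .split() is empty, so A assigns labels[0] on []).
def Pre_label_tokens (tokens : List String) (qty : Int) (brand : String) (model : String) (item : String) : Prop :=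
  tokens ≠ [] ∨ ((brand = "" ∨ PySem.Str.split₀ brand ≠ []) ∧ (model = "" ∨ PySem.Str.split₀ model ≠ []) ∧
                 (item = "" ∨ PySem.Str.split₀ item ≠ []))
instance (tokens : List String) (qty : Int) (brand : String) (model : String) (item : String) : Decidable (Pre_label_tokens tokens qty brand model item) := by unfold Pre_label_tokens; infer_instance

def pvWitness_label_tokens : List String × Int × String × String × String :=
  (["2", "acme", "x", "1", "pro", "hammer"], 2, "acme x", "x 1", "hammer")

def Spec_label_tokens (tokens : List String) (qty : Int) (brand : String) (model : String) (item : String) (out : List String) : Prop := out = label_tokens_alt tokens qty brand model item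
instance (tokens : List String) (qty : Int) (brand : String) (model : String) (item : String) (out : List String) : Decidable (Spec_label_tokens tokens qty brand model item out) := by unfold Spec_label_tokens; infer_instance

-- ===== CLAIM (what is proved, stated in full; the proofs are below) =====
def Claim_equal_label_tokens : Prop := ∀ (tokens : List String) (qty : Int) (brand : String) (model : String) (item : String), Dom_label_tokens tokens qty brand model item → Pre_label_tokens tokens qty brand model item → Spec_label_tokens tokens qty brand model item (label_tokens tokens qty brand model item)

-- ===== LEMMAS AND PROOFS =====

-- ---------- find?: characterizations of the two searches ----------

theorem pvFindLoopA_eq (tokens sub : List String) (l : List Int) :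
    pvFindLoopA tokens sub l
      = ((l.find? (fun i => PySem.List.slice tokens (some i) (some (i + (sub.length : Int))) == sub)).getD (-1)) := by
  induction l with
  | nil => rfl
  | cons i rest ih =>
    rw [pvFindLoopA, List.find?_cons]
    by_cases hc : (PySem.List.slice tokens (some i) (some (i + (sub.length : Int))) == sub) = true
    · simp [hc]
    · simp only [Bool.not_eq_true] at hc
      simp [hc, ih]

theorem pvFindBGo_eq (tokens : List String) (hd : String) (r : List String) (el : List (Int × String)) :
    pvFindBGo tokens hd r el
      = (((el.find? (fun p => p.2 == hd && PySem.List.slice tokens (some (p.1 + 1)) (some (p.1 + 1 + (r.length : Int))) == r)).map Prod.fst).getD (-1)) := by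
  induction el with
  | nil => rfl
  | cons p rest ih =>
    obtain ⟨i, tok⟩ := p
    rw [pvFindBGo, List.find?_cons]
    by_cases hc : (tok == hd && PySem.List.slice tokens (some (i + 1)) (some (i + 1 + (r.length : Int))) == r) = true
    · simp [hc]
    · simp only [Bool.not_eq_true] at hc
      simp [hc, ih]

theorem pvFindB_eq_find? (tokens : List String) (hd : String) (r : List String) :
    pvFindB tokens (hd :: r)
      = (((PySem.List.pyRange 0 (tokens.length : Int)).find?
          (fun j => PySem.List.pyGetD tokens j "" == hd &&
            PySem.List.slice tokens (some (j + 1)) (some (j + 1 + (r.length : Int))) == r)).getD (-1)) := by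
  show pvFindBGo tokens hd r (PySem.List.enumerate tokens 0) = _
  rw [show PySem.List.enumerate tokens 0 = PySem.List.enumerate tokens from rfl]
  rw [pvFindBGo_eq, PySem.List.enumerate_eq_map_pyRange tokens "", List.find?_map]
  rw [show PySem.List.len tokens = (tokens.length : Int) from rfl]
  cases hfind : (PySem.List.pyRange 0 (tokens.length : Int)).find?
      (fun j => PySem.List.pyGetD tokens j "" == hd &&
        PySem.List.slice tokens (some (j + 1)) (some (j + 1 + (r.length : Int))) == r) with
  | none => rw [show ((fun p : Int × String => p.2 == hd && PySem.List.slice tokens (some (p.1 + 1)) (some (p.1 + 1 + (r.length : Int))) == r) ∘ (fun j => (j, PySem.List.pyGetD tokens j ""))) = (fun j => PySem.List.pyGetD tokens j "" == hd && PySem.List.slice tokens (some (j + 1)) (some (j + 1 + (r.length : Int))) == r) from rfl, hfind]; rfl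
  | some j => rw [show ((fun p : Int × String => p.2 == hd && PySem.List.slice tokens (some (p.1 + 1)) (some (p.1 + 1 + (r.length : Int))) == r) ∘ (fun j => (j, PySem.List.pyGetD tokens j ""))) = (fun j => PySem.List.pyGetD tokens j "" == hd && PySem.List.slice tokens (some (j + 1)) (some (j + 1 + (r.length : Int))) == r) from rfl, hfind]; rfl

-- a slice that is too short is never equal to a nonempty pattern
theorem beq_slice_short (tokens r : List String) (a : Nat)
    (hrl : 0 < r.length) (hlen : tokens.length < a + r.length) :
    (PySem.List.slice tokens (some (a : Int)) (some ((a : Int) + (r.length : Int))) == r) = false := by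
  rw [PySem.List.slice_natCast_add, beq_eq_false_iff_ne]
  intro heq
  have := congrArg List.length heq
  simp [List.length_take, List.length_drop] at this
  omega

-- a successful slice match bounds the match position
theorem beq_slice_bound (tokens r : List String) (a : Nat) (ha : a ≤ tokens.length)
    (h : (PySem.List.slice tokens (some (a : Int)) (some ((a : Int) + (r.length : Int))) == r) = true) :
    a + r.length ≤ tokens.length := by
  rw [PySem.List.slice_natCast_add, beq_iff_eq] at h
  have := congrArg List.length h
  simp [List.length_take, List.length_drop] at this
  omega

-- A's full-window test at j equals B's anchor test at j, for j < len(tokens)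
theorem pred_eq_on_range (tokens : List String) (hd : String) (r : List String) (jn : Nat)
    (hj : jn < tokens.length) :
    (PySem.List.slice tokens (some (jn : Int)) (some ((jn : Int) + (((hd :: r).length : Nat) : Int))) == hd :: r)
      = (PySem.List.pyGetD tokens (jn : Int) "" == hd &&
         PySem.List.slice tokens (some ((jn : Int) + 1)) (some ((jn : Int) + 1 + (r.length : Int))) == r) := by
  rw [PySem.List.slice_natCast_add]
  rw [show ((jn : Int) + 1) = ((jn + 1 : Nat) : Int) by push_cast; ring]
  rw [show (((jn + 1 : Nat) : Int) + (r.length : Int)) = (((jn + 1 : Nat) : Int) + ((r.length : Nat) : Int)) from rfl]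
  rw [PySem.List.slice_natCast_add]
  rw [List.drop_eq_getElem_cons hj]
  rw [show (hd :: r).length = r.length + 1 from rfl, List.take_succ_cons, List.cons_beq_cons]
  rw [PySem.List.pyGetD_eq_getElem tokens "" (by positivity) (by exact_mod_cast hj)]
  simp

theorem find?_congr' {α : Type} (l : List α) (p q : α → Bool) (h : ∀ x ∈ l, p x = q x) :
    l.find? p = l.find? q := by
  induction l with
  | nil => rfl
  | cons x rest ih =>
    rw [List.find?_cons, List.find?_cons, h x (by simp)]
    exact match hq : q x with
    | true => rfl
    | false => ih (fun y hy => h y (by simp [hy]))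

theorem find_range_ext (K n : Int) (P Q : Int → Bool) (hK : K ≤ n)
    (hPQ : ∀ j : Int, 0 ≤ j → j < K → P j = Q j)
    (hQ : ∀ j : Int, 0 ≤ j → K ≤ j → j < n → Q j = false) :
    (((PySem.List.pyRange 0 K).find? P).getD (-1)) = (((PySem.List.pyRange 0 n).find? Q).getD (-1)) := by
  by_cases hK0 : K ≤ 0
  · rw [PySem.List.pyRange_one_eq_nil hK0]
    have hnone : (PySem.List.pyRange 0 n).find? Q = none := by
      rw [List.find?_eq_none]
      intro j hj
      rw [PySem.List.mem_pyRange_one] at hj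
      simp [hQ j hj.1 (hK0.trans hj.1) hj.2]
    simp [hnone]
  · have hK0' : (0 : Int) < K := by omega
    rw [PySem.List.pyRange_one_append 0 K n hK0'.le hK, List.find?_append]
    rw [find?_congr' _ P Q (fun j hj => by
      rw [PySem.List.mem_pyRange_one] at hj
      exact hPQ j hj.1 hj.2)]
    have h2 : (PySem.List.pyRange K n).find? Q = none := by
      rw [List.find?_eq_none]
      intro j hj
      rw [PySem.List.mem_pyRange_one] at hj
      simp [hQ j (hK0'.le.trans hj.1) hj.1 hj.2]
    rw [h2]
    cases (PySem.List.pyRange 0 K).find? Q <;> simp [Option.or]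

theorem findEq (tokens pat : List String) : pvFindA tokens pat = pvFindB tokens pat := by
  match pat with
  | [] =>
    have h0 : (0 : Int) < (tokens.length : Int) - (([] : List String).length : Int) + 1 := by
      simp only [List.length_nil, Nat.cast_zero, sub_zero]
      omega
    rw [pvFindA, PySem.List.pyRange_one_cons h0, pvFindLoopA]
    have hs : (PySem.List.slice tokens (some 0) (some (0 + ((([] : List String).length : Nat) : Int))) == ([] : List String)) = true := by
      simp [PySem.List.slice_zero_start, PySem.List.slice_to tokens (by norm_num : (0:Int) ≤ 0)]
    simp only [List.length_nil, Nat.cast_zero, add_zero] at hs ⊢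
    rw [hs]
    rfl
  | hd :: r =>
    rw [pvFindB_eq_find?, pvFindA, pvFindLoopA_eq]
    apply find_range_ext
    · have h1 : ((hd :: r).length : Int) = (r.length : Int) + 1 := by simp
      omega
    · intro j h0 hK
      lift j to Nat using h0 with jn
      have h1 : ((hd :: r).length : Int) = (r.length : Int) + 1 := by simp
      have hj : jn < tokens.length := by omega
      exact pred_eq_on_range tokens hd r jn hj
    · intro j h0 hK hn
      lift j to Nat using h0 with jn
      have hslice : (PySem.List.slice tokens (some ((jn : Int) + 1)) (some ((jn : Int) + 1 + (r.length : Int))) == r) = false := by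
        rw [show ((jn : Int) + 1) = ((jn + 1 : Nat) : Int) by push_cast; ring]
        rw [show (((jn + 1 : Nat) : Int) + (r.length : Int)) = (((jn + 1 : Nat) : Int) + ((r.length : Nat) : Int)) from rfl]
        apply beq_slice_short
        · have h1 : ((hd :: r).length : Int) = (r.length : Int) + 1 := by simp
          omega
        · have h1 : ((hd :: r).length : Int) = (r.length : Int) + 1 := by simp
          omega
      simp [hslice]

-- bounds of a successful anchor search
theorem findB_bounds (tokens : List String) (hd : String) (r : List String)
    (hne : pvFindB tokens (hd :: r) ≠ -1) :
    0 ≤ pvFindB tokens (hd :: r) ∧ pvFindB tokens (hd :: r) < (tokens.length : Int) ∧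
      pvFindB tokens (hd :: r) + ((hd :: r).length : Int) ≤ (tokens.length : Int) := by
  rw [pvFindB_eq_find?] at hne ⊢
  cases hfind : (PySem.List.pyRange 0 (tokens.length : Int)).find?
      (fun j => PySem.List.pyGetD tokens j "" == hd &&
        PySem.List.slice tokens (some (j + 1)) (some (j + 1 + (r.length : Int))) == r) with
  | none => rw [hfind] at hne; simp at hne
  | some j =>
    simp only [hfind, Option.getD_some]
    have hmem := List.mem_of_find?_eq_some hfind
    rw [PySem.List.mem_pyRange_one] at hmem
    have hQ := List.find?_some hfind
    rw [Bool.and_eq_true] at hQ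
    obtain ⟨hj0, hjn⟩ := hmem
    lift j to Nat using hj0 with jn
    have hjn' : jn < tokens.length := by exact_mod_cast hjn
    have hb : (jn + 1) + r.length ≤ tokens.length := by
      apply beq_slice_bound tokens r (jn + 1) (by omega)
      have := hQ.2
      rw [show ((jn : Int) + 1) = ((jn + 1 : Nat) : Int) by push_cast; ring] at this
      exact this
    refine ⟨by positivity, by exact_mod_cast hjn', ?_⟩
    have : ((hd :: r).length : Int) = (r.length : Int) + 1 := by simp
    omega

-- ---------- spans: the write side ----------

-- proof-side: the effect of one span, exactly A's write block
def pvApplySpan (labels : List String) (sp : Int × Int × String × String) : List String :=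
  (PySem.List.pyRange 1 (sp.2.1 - sp.1)).foldl
    (fun ls j => if sp.1 + j < (ls.length : Int) then PySem.List.pySetD ls (sp.1 + j) sp.2.2.2 else ls)
    (PySem.List.pySetD labels sp.1 sp.2.2.1)

def pvSpanOK (n : Nat) (sp : Int × Int × String × String) : Prop :=
  0 ≤ sp.1 ∧ sp.1 < (n : Int) ∧ sp.1 ≤ sp.2.1 ∧ sp.2.1 ≤ (n : Int)

-- proof-side: B's span list, exactly as label_tokens_alt builds it
def pvSpans (tokens : List String) (qty : Int) (brand : String) (model : String) (item : String) :
    List (Int × Int × String × String) :=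
  let spans0 : List (Int × Int × String × String) := []
  let spans1 := pvAddSpan tokens spans0 [PySem.Int.toStr qty] "B-QUANTITY" "I-QUANTITY"
  let spans2 := if brand ≠ "" then pvAddSpan tokens spans1 (PySem.Str.split₀ brand) "B-BRAND" "I-BRAND" else spans1
  let spans3 := if model ≠ "" then pvAddSpan tokens spans2 (PySem.Str.split₀ model) "B-MODEL" "I-MODEL" else spans2
  let spans4 := if item ≠ "" then pvAddSpan tokens spans3 (PySem.Str.split₀ item) "B-TYPE" "I-TYPE" else spans3
  spans4

theorem altB_eq (tokens : List String) (qty : Int) (brand model item : String) :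
    label_tokens_alt tokens qty brand model item
      = (PySem.List.pyRange 0 (tokens.length : Int)).map
          (fun k => pvLabelAt (pvSpans tokens qty brand model item).reverse k) := rfl

-- fallback-parametrised label_at
def pvLabelAtD (rev : List (Int × Int × String × String)) (k : Int) (fb : String) : String :=
  match rev with
  | [] => fb
  | (s, e, btag, itag) :: rest =>
      if k == s then btag else if s < k && k < e then itag else pvLabelAtD rest k fb

theorem pvLabelAt_eq_D (rev : List (Int × Int × String × String)) (k : Int) :
    pvLabelAt rev k = pvLabelAtD rev k "O" := by
  induction rev with
  | nil => rfl
  | cons sp rest ih =>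
    obtain ⟨s, e, b, i⟩ := sp
    rw [pvLabelAt, pvLabelAtD, ih]

theorem pvLabelAtD_append (l1 l2 : List (Int × Int × String × String)) (k : Int) (fb : String) :
    pvLabelAtD (l1 ++ l2) k fb = pvLabelAtD l1 k (pvLabelAtD l2 k fb) := by
  induction l1 with
  | nil => rfl
  | cons sp rest ih =>
    obtain ⟨s, e, b, i⟩ := sp
    rw [List.cons_append, pvLabelAtD, pvLabelAtD, ih]

theorem length_IloopFold (s : Int) (itag : String) (l : List Int) (ls : List String) :
    ((l.foldl (fun ls j => if s + j < (ls.length : Int) then PySem.List.pySetD ls (s + j) itag else ls) ls).length)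
      = ls.length := by
  induction l generalizing ls with
  | nil => rfl
  | cons j rest ih =>
    rw [List.foldl_cons, ih]
    split
    · rw [PySem.List.length_pySetD]
    · rfl

theorem length_pvApplySpan (labels : List String) (sp : Int × Int × String × String) :
    (pvApplySpan labels sp).length = labels.length := by
  rw [pvApplySpan, length_IloopFold, PySem.List.length_pySetD]

theorem pyGetD_pySetD (ls : List String) (i k : Int) (v : String)
    (hi0 : 0 ≤ i) (hi : i < (ls.length : Int)) (h0 : 0 ≤ k) (hk : k < (ls.length : Int)) :
    PySem.List.pyGetD (PySem.List.pySetD ls i v) k ""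
      = if i = k then v else PySem.List.pyGetD ls k "" := by
  lift i to Nat using hi0 with iN
  lift k to Nat using h0 with kN
  rw [PySem.List.pySetD_natCast, PySem.List.pyGetD_natCast, PySem.List.pyGetD_natCast]
  have hiN : iN < ls.length := by exact_mod_cast hi
  have hkN : kN < ls.length := by exact_mod_cast hk
  rw [List.getD_eq_getElem?_getD, List.getD_eq_getElem?_getD, List.getElem?_set]
  by_cases h : iN = kN
  · have h' : ((iN : Int) = (kN : Int)) := by exact_mod_cast h
    simp [h, hkN]
  · have h' : ¬((iN : Int) = (kN : Int)) := by exact_mod_cast h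
    simp [h, h']

theorem Iloop_pyGetD (s : Int) (itag : String) (t : Nat) :
    ∀ (ls : List String), 0 ≤ s → s + 1 + (t : Int) ≤ (ls.length : Int) →
    ∀ (k : Int), 0 ≤ k → k < (ls.length : Int) →
    PySem.List.pyGetD
      (((List.range t).map (fun u : Nat => (1 : Int) + u)).foldl
        (fun ls j => if s + j < (ls.length : Int) then PySem.List.pySetD ls (s + j) itag else ls) ls) k ""
      = if s < k ∧ k < s + 1 + (t : Int) then itag else PySem.List.pyGetD ls k "" := by
  induction t with
  | zero =>
    intro ls hs hlen k h0 hk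
    simp only [List.range_zero, List.map_nil, List.foldl_nil, Nat.cast_zero, add_zero]
    rw [if_neg (by omega)]
  | succ t ih =>
    intro ls hs hlen k h0 hk
    rw [List.range_succ, List.map_append, List.foldl_append]
    simp only [List.map_cons, List.map_nil, List.foldl_cons, List.foldl_nil]
    have hmidlen : (((List.range t).map (fun u : Nat => (1 : Int) + u)).foldl
        (fun ls j => if s + j < (ls.length : Int) then PySem.List.pySetD ls (s + j) itag else ls) ls).length = ls.length :=
      length_IloopFold s itag _ ls
    have hguard : s + (1 + (t : Int)) < ((((List.range t).map (fun u : Nat => (1 : Int) + u)).foldl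
        (fun ls j => if s + j < (ls.length : Int) then PySem.List.pySetD ls (s + j) itag else ls) ls).length : Int) := by
      rw [hmidlen]
      push_cast at hlen ⊢
      omega
    rw [if_pos hguard]
    rw [pyGetD_pySetD _ _ _ _ (by omega) (by rw [hmidlen]; push_cast at hlen ⊢; omega) h0 (by rw [hmidlen]; exact hk)]
    rw [ih ls hs (by push_cast at hlen ⊢; omega) k h0 hk]
    push_cast
    split_ifs <;> first | rfl | omega

theorem applySpan_pyGetD (labels : List String) (sp : Int × Int × String × String)
    (hok : pvSpanOK labels.length sp) (k : Int) (h0 : 0 ≤ k) (hk : k < (labels.length : Int)) :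
    PySem.List.pyGetD (pvApplySpan labels sp) k ""
      = if k = sp.1 then sp.2.2.1 else if sp.1 < k ∧ k < sp.2.1 then sp.2.2.2
        else PySem.List.pyGetD labels k "" := by
  obtain ⟨s, e, btag, itag⟩ := sp
  obtain ⟨hs0, hsn, hse, hen⟩ := hok
  simp only at hs0 hsn hse hen ⊢
  rw [pvApplySpan]
  simp only
  rw [PySem.List.pyRange_one]
  have ht : s + 1 + (((e - s - 1).toNat : Nat) : Int) ≤ ((PySem.List.pySetD labels s btag).length : Int) := by
    rw [PySem.List.length_pySetD]
    omega
  rw [Iloop_pyGetD s itag ((e - s - 1).toNat) _ hs0 ht k h0 (by rw [PySem.List.length_pySetD]; exact hk)]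
  rw [pyGetD_pySetD labels s k btag hs0 hsn h0 hk]
  split_ifs <;> first | rfl | omega

theorem foldl_applySpans_pyGetD (sps : List (Int × Int × String × String)) :
    ∀ (base : List String), (∀ sp ∈ sps, pvSpanOK base.length sp) →
    ∀ (k : Int), 0 ≤ k → k < (base.length : Int) →
    PySem.List.pyGetD (sps.foldl pvApplySpan base) k ""
      = pvLabelAtD sps.reverse k (PySem.List.pyGetD base k "") := by
  induction sps with
  | nil => intro base _ k h0 hk; rfl
  | cons sp rest ih =>
    intro base hok k h0 hk
    rw [List.foldl_cons, List.reverse_cons, pvLabelAtD_append]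
    have hlen : (pvApplySpan base sp).length = base.length := length_pvApplySpan base sp
    rw [ih (pvApplySpan base sp) (fun q hq => by rw [hlen]; exact hok q (by simp [hq])) k h0 (by rw [hlen]; exact hk)]
    congr 1
    rw [applySpan_pyGetD base sp (hok sp (by simp)) k h0 hk]
    obtain ⟨s, e, btag, itag⟩ := sp
    rw [pvLabelAtD, pvLabelAtD]
    simp only [beq_iff_eq, Bool.and_eq_true, decide_eq_true_eq]

-- ---------- bridging A's write chain to the span fold ----------

theorem stage_bridge (tokens : List String) (S : List (Int × Int × String × String))
    (base : List String) (w : List String) (btag itag : String) :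
    pvApplyField tokens (S.foldl pvApplySpan base) w btag itag
      = (pvAddSpan tokens S w btag itag).foldl pvApplySpan base := by
  rw [pvApplyField, pvAddSpan, findEq]
  by_cases hfb : pvFindB tokens w = -1
  · simp [hfb]
  · simp only [hfb, bne_iff_ne, ne_eq, not_false_eq_true, if_true]
    rw [List.foldl_append, List.foldl_cons, List.foldl_nil, pvApplySpan]
    dsimp only
    rw [show pvFindB tokens w + (w.length : Int) - pvFindB tokens w = (w.length : Int) by ring]

theorem qty_bridge (tokens : List String) (base : List String) (w0 : String) (btag itag : String) :
    (if pvFindA tokens [w0] != -1 then PySem.List.pySetD base (pvFindA tokens [w0]) btag else base)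
      = (pvAddSpan tokens [] [w0] btag itag).foldl pvApplySpan base := by
  rw [pvAddSpan, findEq]
  by_cases hfb : pvFindB tokens [w0] = -1
  · simp [hfb]
  · simp only [hfb, bne_iff_ne, ne_eq, not_false_eq_true, if_true]
    rw [List.nil_append, List.foldl_cons, List.foldl_nil, pvApplySpan]
    dsimp only
    rw [show pvFindB tokens [w0] + (([w0] : List String).length : Int) - pvFindB tokens [w0] = (([w0] : List String).length : Int) by ring]
    rw [show (([w0] : List String).length : Int) = 1 by simp]
    rw [PySem.List.pyRange_one_eq_nil (le_refl 1), List.foldl_nil]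

theorem A_eq_foldl (tokens : List String) (qty : Int) (brand model item : String) :
    label_tokens tokens qty brand model item
      = (pvSpans tokens qty brand model item).foldl pvApplySpan (List.replicate tokens.length "O") := by
  simp only [label_tokens, pvSpans]
  rw [qty_bridge tokens (List.replicate tokens.length "O") (PySem.Int.toStr qty) "B-QUANTITY" "I-QUANTITY"]
  by_cases hb : brand = "" <;> by_cases hm : model = "" <;> by_cases hi : item = "" <;>
    simp only [hb, hm, hi, ne_eq, not_true_eq_false, not_false_eq_true, if_true, if_false] <;>
    simp only [stage_bridge]

-- every span B collects is in range (under Pre_)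
theorem addSpan_sub (tokens : List String) (S : List (Int × Int × String × String))
    (w : List String) (btag itag : String) (sp : Int × Int × String × String)
    (hsp : sp ∈ pvAddSpan tokens S w btag itag) :
    sp ∈ S ∨ (pvFindB tokens w ≠ -1 ∧ sp = (pvFindB tokens w, pvFindB tokens w + (w.length : Int), btag, itag)) := by
  rw [pvAddSpan] at hsp
  by_cases hfb : pvFindB tokens w = -1
  · simp [hfb] at hsp
    exact Or.inl hsp
  · simp only [hfb, bne_iff_ne, ne_eq, not_false_eq_true, if_true] at hsp
    rw [List.mem_append] at hsp
    rcases hsp with h | h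
    · exact Or.inl h
    · simp only [List.mem_singleton] at h
      exact Or.inr ⟨hfb, h⟩

theorem span_of_find (tokens : List String) (w : List String) (btag itag : String)
    (hw : w = [] → tokens ≠ []) (hfb : pvFindB tokens w ≠ -1) :
    pvSpanOK tokens.length (pvFindB tokens w, pvFindB tokens w + (w.length : Int), btag, itag) := by
  match w with
  | [] =>
    have hn' : 0 < tokens.length := List.length_pos_iff.mpr (hw rfl)
    have hn2 : (0 : Int) < (tokens.length : Int) := by exact_mod_cast hn'
    have h0 : pvFindB tokens ([] : List String) = 0 := rfl
    unfold pvSpanOK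
    dsimp only
    rw [h0]
    simp only [List.length_nil, Nat.cast_zero, add_zero]
    omega
  | hd :: r =>
    obtain ⟨h1, h2, h3⟩ := findB_bounds tokens hd r hfb
    have hc : (0 : Int) ≤ ((hd :: r).length : Int) := by positivity
    unfold pvSpanOK
    dsimp only
    omega

theorem addSpan_ok (tokens : List String) (S : List (Int × Int × String × String))
    (w : List String) (btag itag : String)
    (hS : ∀ sp ∈ S, pvSpanOK tokens.length sp) (hw : w = [] → tokens ≠ []) :
    ∀ sp ∈ pvAddSpan tokens S w btag itag, pvSpanOK tokens.length sp := by
  intro sp hsp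
  rcases addSpan_sub tokens S w btag itag sp hsp with h | ⟨hfb, heq⟩
  · exact hS sp h
  · subst heq
    exact span_of_find tokens w btag itag hw hfb

theorem spans_ok (tokens : List String) (qty : Int) (brand model item : String)
    (hpre : Pre_label_tokens tokens qty brand model item) :
    ∀ sp ∈ pvSpans tokens qty brand model item, pvSpanOK tokens.length sp := by
  rw [Pre_label_tokens] at hpre
  have hfield : ∀ f : String, (f = "" ∨ PySem.Str.split₀ f ≠ []) →
      PySem.Str.split₀ f = [] → f ≠ "" → tokens ≠ [] := by
    intro f hf hsp hne
    rcases hf with hf | hf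
    · exact absurd hf hne
    · exact absurd hsp hf
  have hb' : PySem.Str.split₀ brand = [] → brand ≠ "" → tokens ≠ [] := by
    rcases hpre with h | h
    · intro _ _; exact h
    · exact hfield brand h.1
  have hm' : PySem.Str.split₀ model = [] → model ≠ "" → tokens ≠ [] := by
    rcases hpre with h | h
    · intro _ _; exact h
    · exact hfield model h.2.1
  have hi' : PySem.Str.split₀ item = [] → item ≠ "" → tokens ≠ [] := by
    rcases hpre with h | h
    · intro _ _; exact h
    · exact hfield item h.2.2
  intro sp hsp
  simp only [pvSpans] at hsp
  have peel : ∀ (S : List (Int × Int × String × String)) (f bt it : String),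
      (PySem.Str.split₀ f = [] → f ≠ "" → tokens ≠ []) →
      (∀ q ∈ S, pvSpanOK tokens.length q) →
      ∀ q ∈ (if f ≠ "" then pvAddSpan tokens S (PySem.Str.split₀ f) bt it else S),
        pvSpanOK tokens.length q := by
    intro S f bt it hf hS q hq
    split at hq
    · next hc => exact addSpan_ok tokens S _ bt it hS (fun h0 => hf h0 hc) q hq
    · exact hS q hq
  exact peel _ item "B-TYPE" "I-TYPE" hi'
    (peel _ model "B-MODEL" "I-MODEL" hm'
      (peel _ brand "B-BRAND" "I-BRAND" hb'
        (addSpan_ok tokens [] [PySem.Int.toStr qty] "B-QUANTITY" "I-QUANTITY"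
          (by intro q hq; simp at hq) (by simp))))
    sp hsp

-- ===== VERDICT (by name: the statement is the Claim_ definition above) =====
theorem label_tokens_spec : Claim_equal_label_tokens := by
  intro tokens qty brand model item _ hpre
  unfold Spec_label_tokens
  rw [A_eq_foldl, altB_eq]
  have hok := spans_ok tokens qty brand model item hpre
  have hlenfold : ∀ (sps : List (Int × Int × String × String)) (base : List String),
      (sps.foldl pvApplySpan base).length = base.length := by
    intro sps
    induction sps with
    | nil => intro base; rfl
    | cons sp rest ih => intro base; rw [List.foldl_cons, ih, length_pvApplySpan]
  have hlenL : ((pvSpans tokens qty brand model item).foldl pvApplySpan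
      (List.replicate tokens.length "O")).length = tokens.length := by
    rw [hlenfold, List.length_replicate]
  apply List.ext_getElem
  · rw [hlenL, List.length_map, PySem.List.length_pyRange_one]
    simp
  · intro k hk1' hk2'
    have hk1 : k < tokens.length := by rw [hlenL] at hk1'; exact hk1'
    have hmap : ((PySem.List.pyRange 0 (tokens.length : Int)).map
        (fun k => pvLabelAt (pvSpans tokens qty brand model item).reverse k))[k]?
        = some (pvLabelAt (pvSpans tokens qty brand model item).reverse (k : Int)) :=
      PySem.List.getElem?_map_pyRange_zero _ tokens.length k hk1
    have hpoint := foldl_applySpans_pyGetD (pvSpans tokens qty brand model item)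
      (List.replicate tokens.length "O")
      (by rw [List.length_replicate]; exact hok) (k : Int) (by positivity)
      (by rw [List.length_replicate]; exact_mod_cast hk1)
    have hbase : PySem.List.pyGetD (List.replicate tokens.length "O") (k : Int) "" = "O" := by
      rw [PySem.List.pyGetD_natCast, List.getD_eq_getElem?_getD]
      simp [hk1]
    rw [hbase] at hpoint
    have hLk : ((pvSpans tokens qty brand model item).foldl pvApplySpan
        (List.replicate tokens.length "O"))[k]'hk1'
        = PySem.List.pyGetD ((pvSpans tokens qty brand model item).foldl pvApplySpan
            (List.replicate tokens.length "O")) (k : Int) "" := by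
      rw [PySem.List.pyGetD_eq_getElem _ "" (by positivity) (by rw [hlenL]; exact_mod_cast hk1)]
      simp
    have hRk : ((PySem.List.pyRange 0 (tokens.length : Int)).map
        (fun k => pvLabelAt (pvSpans tokens qty brand model item).reverse k))[k]'hk2'
        = pvLabelAt (pvSpans tokens qty brand model item).reverse (k : Int) := by
      have h := hmap
      rw [List.getElem?_eq_getElem hk2'] at h
      exact Option.some.inj h
    rw [hLk, hRk, hpoint, pvLabelAt_eq_D]
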